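-- pv_equiv track=rewrite | github.com/swiss-ai/posttraining-data | 05-annotations/extract_boxed_answers.py | extract_boxed_from_text
-- ===== SOURCE A (Python) =====
-- from typing import Dict, Any, List, Tuple, Optional
--
-- def extract_boxed_from_text(text: str) -> Tuple[str, List[str]]:
--     """
--     Extract all \\boxed{...} patterns from text using proper brace matching.
--
--     Args:
--         text: Text potentially containing \\boxed{answer} patterns
--
--     Returns:
--         Tuple of (cleaned_text, list_of_answers)
--     """
--     if '\\boxed{' not in text:
--         return text, []
--
--     result = []
--     answers = []
--     i = 0
--
--     while i < len(text):
--         # Look for \\boxed{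
--         if text[i:i+7] == '\\boxed{':
--             # Find the matching closing brace
--             brace_count = 1
--             j = i + 7  # Start after '\\boxed{'
--
--             while j < len(text) and brace_count > 0:
--                 if text[j] == '{':
--                     brace_count += 1
--                 elif text[j] == '}':
--                     brace_count -= 1
--                 j += 1
--
--             if brace_count == 0:
--                 # Found matching closing brace
--                 # Extract content between braces
--                 content = text[i+7:j-1]  # j-1 because j is one past the closing }
--                 answers.append(content)
--                 result.append(content)
--                 i = j  # Continue after the closing }
--             else:
--                 # Malformed \\boxed{ without closing brace
--                 # Keep as is
--                 result.append(text[i])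
--                 i += 1
--         else:
--             result.append(text[i])
--             i += 1
--
--     return ''.join(result), answers
-- ===== SOURCE B (Python) =====
-- def extract_boxed_from_text(text):
--     """Precompute the matching close brace of every open brace in one
--     right-to-left stack pass, then jump between \\boxed{ occurrences with
--     str.find and O(1) match lookups."""
--     match = {}
--     stack = []
--     for idx in range(len(text) - 1, -1, -1):
--         ch = text[idx]
--         if ch == '}':
--             stack.append(idx)
--         elif ch == '{':
--             if stack:
--                 match[idx] = stack.pop()
--     parts = []
--     answers = []
--     i = 0
--     while True:
--         k = text.find('\\boxed{', i)
--         if k == -1: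
--             parts.append(text[i:])
--             break
--         m = match.get(k + 6)
--         if m is None:
--             parts.append(text[i:k + 1])
--             i = k + 1
--         else:
--             content = text[k + 7:m]
--             parts.append(text[i:k])
--             parts.append(content)
--             answers.append(content)
--             i = m + 1
--     return ''.join(parts), answers
-- ===== Notes on version B (the rewrite author's own statement) =====
-- stated objective: alternative
-- what changed: B precomputes the matching close brace of every open brace in one right-to-left stack pass stored in a dict, then walks the text with str.find jumps, O(1) match lookups and whole-slice appends, instead of A re-scanning forward for a matching brace at every boxed occurrence (worst-case quadratic) with char-by-char appends.
import Mathlib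
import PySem

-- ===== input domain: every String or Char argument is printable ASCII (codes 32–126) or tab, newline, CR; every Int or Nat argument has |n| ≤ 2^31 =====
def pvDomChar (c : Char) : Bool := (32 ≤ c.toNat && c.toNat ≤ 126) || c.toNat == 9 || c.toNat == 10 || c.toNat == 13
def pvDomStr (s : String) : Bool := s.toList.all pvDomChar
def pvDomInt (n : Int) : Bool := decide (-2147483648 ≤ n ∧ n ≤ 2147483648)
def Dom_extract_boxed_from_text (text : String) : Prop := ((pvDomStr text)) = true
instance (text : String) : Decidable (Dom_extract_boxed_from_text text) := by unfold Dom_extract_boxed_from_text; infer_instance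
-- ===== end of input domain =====

-- B replaces A's per-occurrence brace re-scans by one right-to-left stack pass that
-- records every matching brace pair in a dict, then jumps between \boxed{ occurrences
-- with str.find and O(1) lookups (objective: alternative algorithm).

-- ===== PORT A =====

def boxedPat : List Char := ['\\', 'b', 'o', 'x', 'e', 'd', '{']

-- A's inner `while j < len(text) and brace_count > 0` loop, as recursion on the
-- suffix after `\boxed{`: returns the number of consumed chars when the count
-- reaches 0 (one past the closing '}'), none when the text ends first.
def innerA : List Char → Nat → Option Nat
  | _, 0 => some 0
  | [], _ + 1 => none
  | c :: rest, k + 1 =>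
      (innerA rest (if c = '{' then k + 2 else if c = '}' then k else k + 1)).map (· + 1)

-- A's outer `while i < len(text)` loop, as recursion on the suffix from i.
def outerA : List Char → List Char × List (List Char)
  | [] => ([], [])
  | c :: rest =>
    if (c :: rest).take 7 = boxedPat then
      match innerA (rest.drop 6) 1 with
      | some m =>
          let content := (rest.drop 6).take (m - 1)
          let r := outerA (rest.drop (6 + m))
          (content ++ r.1, content :: r.2)
      | none =>
          let r := outerA rest
          (c :: r.1, r.2)
    else
      let r := outerA rest
      (c :: r.1, r.2)
termination_by cs => cs.length
decreasing_by
  · simp only [List.length_cons, List.length_drop]; omega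
  · simp only [List.length_cons]; omega
  · simp only [List.length_cons]; omega

def extract_boxed_from_text (text : String) : String × List String :=
  if PySem.Str.isIn "\\boxed{" text = false then (text, [])
  else
    let r := outerA text.toList
    (String.ofList r.1, r.2.map String.ofList)

-- ===== PORT B =====

-- Source B's `for idx in range(len(text)-1, -1, -1)` stack pass: the argument list is
-- the reversed text, idx counts down; matched pairs go into the dict.
def bBuild : List Char → Int → List Int → PySem.Dict Int Int → PySem.Dict Int Int
  | [], _, _, d => d
  | c :: rest, idx, stack, d =>
    if c = '}' then bBuild rest (idx - 1) (idx :: stack) d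
    else if c = '{' then
      match stack with
      | q :: s => bBuild rest (idx - 1) s (d.insert idx q)
      | [] => bBuild rest (idx - 1) [] d
    else bBuild rest (idx - 1) stack d

-- Source B's `while True` find/jump loop; fuel (= len+1 at the call site) only makes
-- the recursion total, i strictly increases on every iteration.
def bLoop (cs : List Char) (d : PySem.Dict Int Int) : Nat → Nat → List Char × List (List Char)
  | 0, i => (cs.drop i, [])
  | fuel + 1, i =>
    let k := PySem.Chars.findFrom cs boxedPat (i : Int) none
    if k = -1 then (cs.drop i, [])
    else
      match d.get? (k + 6) with
      | none =>
        let r := bLoop cs d fuel (k.toNat + 1)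
        (PySem.List.slice cs (some (i : Int)) (some (k + 1)) ++ r.1, r.2)
      | some m =>
        let content := PySem.List.slice cs (some (k + 7)) (some m)
        let r := bLoop cs d fuel (m.toNat + 1)
        (PySem.List.slice cs (some (i : Int)) (some k) ++ content ++ r.1, content :: r.2)

def extract_boxed_from_text_alt (text : String) : String × List String :=
  let cs := text.toList
  let d := bBuild cs.reverse ((cs.length : Int) - 1) [] PySem.Dict.empty
  let r := bLoop cs d (cs.length + 1) 0
  (String.ofList r.1, r.2.map String.ofList)

-- ===== PRECONDITION & SPEC =====
def Spec_extract_boxed_from_text (text : String) (out : String × List String) : Prop := out = extract_boxed_from_text_alt text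
instance (text : String) (out : String × List String) : Decidable (Spec_extract_boxed_from_text text out) := by unfold Spec_extract_boxed_from_text; infer_instance

-- ===== CLAIM (what is proved, stated in full; the proofs are below) =====
def Claim_equal_extract_boxed_from_text : Prop := ∀ (text : String), Dom_extract_boxed_from_text text → Spec_extract_boxed_from_text text (extract_boxed_from_text text)

-- ===== LEMMAS AND PROOFS =====

-- Positions (relative) of the unmatched '}'s of a list, in increasing order.
def uCloses : List Char → List Nat
  | [] => []
  | c :: rest =>
    if c = '}' then 0 :: (uCloses rest).map (· + 1)
    else if c = '{' then ((uCloses rest).tail).map (· + 1)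
    else (uCloses rest).map (· + 1)

lemma uCloses_lt (cs : List Char) : ∀ r ∈ uCloses cs, r < cs.length := by
  induction cs with
  | nil => simp [uCloses]
  | cons c rest ih =>
    intro r hr
    unfold uCloses at hr
    split_ifs at hr with h1 h2 <;> simp only [List.mem_cons, List.mem_map] at hr
    · rcases hr with rfl | ⟨a, ha, rfl⟩
      · simp
      · have := ih a ha; simp; omega
    · rcases hr with ⟨a, ha, rfl⟩
      have := ih a (List.mem_of_mem_tail ha); simp; omega
    · rcases hr with ⟨a, ha, rfl⟩
      have := ih a ha; simp; omega

lemma innerA_eq (cs : List Char) : ∀ k, innerA cs (k + 1) = ((uCloses cs)[k]?).map (· + 1) := by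
  induction cs with
  | nil => intro k; simp [innerA, uCloses]
  | cons c rest ih =>
    intro k
    unfold innerA uCloses
    split_ifs with h1 h2 h2
    · exact absurd h1 (by subst h2; decide)
    · -- c = '{'
      rw [show k + 2 = (k + 1) + 1 from rfl, ih (k + 1)]
      cases hu : uCloses rest with
      | nil => simp
      | cons a tl => simp [Option.map_map]
    · -- c = '}'
      cases k with
      | zero => simp [innerA]
      | succ j => rw [ih j]; simp [Option.map_map]
    · rw [ih k]; simp [Option.map_map]

-- What Source B's dict holds at key p.
def matchSpec (cs : List Char) (p : Nat) : Option Int :=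
  if cs[p]? = some '{' then ((uCloses (cs.drop (p + 1))).head?).map (fun r => ((p + 1 + r : Nat) : Int))
  else none

lemma stack_shift (l : List Nat) (s : Nat) :
    (l.map (· + 1)).map (fun r => ((s + r : Nat) : Int))
      = l.map (fun r => (((s + 1) + r : Nat) : Int)) := by
  induction l with
  | nil => simp
  | cons a tl ih =>
    simp only [List.map_cons, ih]
    congr 1
    exact congrArg Nat.cast (by omega)

lemma bBuild_inv (cs : List Char) :
    ∀ (t : Nat) (d : PySem.Dict Int Int), t ≤ cs.length →
      (∀ p : Nat, d.get? (p : Int) = if t ≤ p then matchSpec cs p else none) →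
      ∀ p : Nat,
        (bBuild ((cs.take t).reverse) ((t : Int) - 1)
            ((uCloses (cs.drop t)).map (fun r => ((t + r : Nat) : Int))) d).get? (p : Int)
          = matchSpec cs p := by
  intro t
  induction t with
  | zero =>
    intro d _ hd p
    simpa using hd p
  | succ s ih =>
    intro d hts hd p
    have hs : s < cs.length := by omega
    have htake : (cs.take (s+1)).reverse = cs[s] :: (cs.take s).reverse := by
      rw [List.take_add_one, List.getElem?_eq_getElem hs]; simp
    have hdrop : cs.drop s = cs[s] :: cs.drop (s+1) := (List.getElem_cons_drop ..).symm
    have e1 : ((s+1 : Nat) : Int) - 1 - 1 = ((s : Nat) : Int) - 1 := by push_cast; ring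
    have ekey : ((s+1 : Nat) : Int) - 1 = ((s : Nat) : Int) := by push_cast; ring
    rw [htake]
    by_cases hc1 : cs[s] = '}'
    · -- push the index
      have e2 : (uCloses (cs.drop s)).map (fun r => ((s + r : Nat) : Int))
          = (((s+1 : Nat) : Int) - 1)
              :: (uCloses (cs.drop (s+1))).map (fun r => ((s + 1 + r : Nat) : Int)) := by
        rw [hdrop, uCloses, if_pos hc1, List.map_cons, stack_shift]
        congr 1
        rw [ekey]; exact congrArg Nat.cast (by omega)
      have hd' : ∀ q : Nat, d.get? (q : Int) = if s ≤ q then matchSpec cs q else none := by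
        intro q
        rw [hd q]
        by_cases hq : q = s
        · subst hq
          rw [if_neg (by omega), if_pos le_rfl]
          unfold matchSpec
          rw [List.getElem?_eq_getElem hs, if_neg (by simp [hc1])]
        · rcases Nat.lt_or_ge q s with h | h
          · rw [if_neg (by omega), if_neg (by omega)]
          · rw [if_pos (by omega), if_pos (by omega)]
      simp only [bBuild]
      rw [if_pos hc1, e1, ← e2]
      exact ih d (by omega) hd' p
    · by_cases hc2 : cs[s] = '{'
      · cases hu : uCloses (cs.drop (s+1)) with
        | nil =>
          have e2 : (uCloses (cs.drop s)).map (fun r => ((s + r : Nat) : Int)) = [] := by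
            rw [hdrop, uCloses, if_neg hc1, if_pos hc2, hu]; simp
          have hd' : ∀ q : Nat, d.get? (q : Int) = if s ≤ q then matchSpec cs q else none := by
            intro q
            rw [hd q]
            by_cases hq : q = s
            · subst hq
              rw [if_neg (by omega), if_pos le_rfl]
              unfold matchSpec
              rw [List.getElem?_eq_getElem hs, if_pos (by simp [hc2]), hu]
              simp
            · rcases Nat.lt_or_ge q s with h | h
              · rw [if_neg (by omega), if_neg (by omega)]
              · rw [if_pos (by omega), if_pos (by omega)]
          simp only [bBuild, if_neg hc1, if_pos hc2, List.map_nil]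
          rw [e1, ← e2]
          exact ih d (by omega) hd' p
        | cons r0 tl =>
          have e2 : (uCloses (cs.drop s)).map (fun r => ((s + r : Nat) : Int))
              = tl.map (fun r => ((s + 1 + r : Nat) : Int)) := by
            rw [hdrop, uCloses, if_neg hc1, if_pos hc2, hu]
            simpa using stack_shift tl s
          have hd' : ∀ q : Nat,
              (d.insert (((s+1 : Nat) : Int) - 1) ((s + 1 + r0 : Nat) : Int)).get? (q : Int)
                = if s ≤ q then matchSpec cs q else none := by
            intro q
            rw [PySem.Dict.get?_insert, ekey]
            by_cases hq : q = s
            · subst hq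
              rw [if_pos rfl, if_pos le_rfl]
              unfold matchSpec
              rw [List.getElem?_eq_getElem hs, if_pos (by simp [hc2]), hu]
              simp
            · rw [if_neg (by exact_mod_cast hq), hd q]
              rcases Nat.lt_or_ge q s with h | h
              · rw [if_neg (by omega), if_neg (by omega)]
              · rw [if_pos (by omega), if_pos (by omega)]
          simp only [List.map_cons, bBuild, if_neg hc1, if_pos hc2]
          rw [e1, ← e2]
          exact ih _ (by omega) hd' p
      · -- ordinary character
        have e2 : (uCloses (cs.drop s)).map (fun r => ((s + r : Nat) : Int))
            = (uCloses (cs.drop (s+1))).map (fun r => ((s + 1 + r : Nat) : Int)) := by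
          rw [hdrop, uCloses, if_neg hc1, if_neg hc2, stack_shift]
        have hd' : ∀ q : Nat, d.get? (q : Int) = if s ≤ q then matchSpec cs q else none := by
          intro q
          rw [hd q]
          by_cases hq : q = s
          · subst hq
            rw [if_neg (by omega), if_pos le_rfl]
            unfold matchSpec
            rw [List.getElem?_eq_getElem hs, if_neg (by simp [hc2])]
          · rcases Nat.lt_or_ge q s with h | h
            · rw [if_neg (by omega), if_neg (by omega)]
            · rw [if_pos (by omega), if_pos (by omega)]
        simp only [bBuild]
        rw [if_neg hc1, if_neg hc2, e1, ← e2]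
        exact ih d (by omega) hd' p

lemma matchSpec_ge (cs : List Char) (p : Nat) (h : cs.length ≤ p) : matchSpec cs p = none := by
  unfold matchSpec
  rw [List.getElem?_eq_none h]
  simp

lemma dict_get (cs : List Char) (p : Nat) :
    (bBuild cs.reverse ((cs.length : Int) - 1) [] PySem.Dict.empty).get? (p : Int)
      = matchSpec cs p := by
  have hd : ∀ q : Nat, (PySem.Dict.empty : PySem.Dict Int Int).get? (q : Int)
      = if cs.length ≤ q then matchSpec cs q else none := by
    intro q
    rw [PySem.Dict.get?_empty]
    by_cases h : cs.length ≤ q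
    · rw [if_pos h, matchSpec_ge cs q h]
    · rw [if_neg h]
  have := bBuild_inv cs cs.length PySem.Dict.empty le_rfl hd p
  rw [List.take_length, List.drop_length] at this
  simpa only [uCloses, List.map_nil] using this

lemma pat_len : boxedPat.length = 7 := rfl

lemma not_prefix_iff_take (cs : List Char) (h : ¬ (boxedPat <+: cs)) : cs.take 7 ≠ boxedPat := by
  intro he
  exact h (by rw [List.prefix_iff_eq_take, pat_len, he])

lemma outerA_skip : ∀ (j : Nat) (cs : List Char), j ≤ cs.length →
    (∀ t, t < j → ¬ (boxedPat <+: cs.drop t)) →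
    outerA cs = (cs.take j ++ (outerA (cs.drop j)).1, (outerA (cs.drop j)).2) := by
  intro j
  induction j with
  | zero => intro cs _ _; simp
  | succ n ih =>
    intro cs hlen hno
    match cs, hlen with
    | c :: rest, hlen =>
      have h0 : ¬ (boxedPat <+: (c :: rest)) := by simpa using hno 0 (Nat.succ_pos n)
      rw [outerA, if_neg (not_prefix_iff_take _ h0)]
      have := ih rest (by simpa using hlen) (fun t ht => by simpa using hno (t + 1) (by omega))
      simp only [List.take_succ_cons, List.drop_succ_cons, this, List.cons_append]

lemma outerA_no_occ (cs : List Char) :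
    (∀ t, ¬ (boxedPat <+: cs.drop t)) → outerA cs = (cs, []) := by
  intro h
  rw [outerA_skip cs.length cs le_rfl (fun t _ => h t)]
  simp [outerA]

lemma bLoop_eq (cs : List Char) :
    ∀ (fuel i : Nat), i ≤ cs.length → cs.length - i < fuel →
      bLoop cs (bBuild cs.reverse ((cs.length : Int) - 1) [] PySem.Dict.empty) fuel i
        = outerA (cs.drop i) := by
  intro fuel
  induction fuel with
  | zero => intro i h1 h2; omega
  | succ f ih =>
    intro i hi hfi
    simp only [bLoop]
    by_cases hneg : PySem.Chars.findFrom cs boxedPat (i : Int) none = -1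
    · rw [if_pos hneg]
      have hno : ¬ (boxedPat <:+: cs.drop i) :=
        (PySem.Chars.findFrom_natCast_eq_neg_one_iff cs boxedPat i hi).mp hneg
      rw [outerA_no_occ (cs.drop i)
        (fun t hpre => hno (((hpre.isInfix).trans ((List.drop_suffix t _).isInfix))))]
    · rw [if_neg hneg]
      obtain ⟨hik, hpre, hmin⟩ := PySem.Chars.findFrom_natCast_spec cs boxedPat i hi hneg
      set K := PySem.Chars.findFrom cs boxedPat (i : Int) none with hK
      set κ := K.toNat with hκ
      have h0 : (0 : Int) ≤ K := le_trans (by positivity) hik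
      have hkκ : K = (κ : Int) := (Int.toNat_of_nonneg h0).symm
      have hiκ : i ≤ κ := by omega
      have hκ7 : κ + 7 ≤ cs.length := by
        have h1 := hpre.length_le
        rw [pat_len, List.length_drop] at h1
        omega
      -- A side: copy verbatim up to κ, then expand the \boxed step
      have hskip := outerA_skip (κ - i) (cs.drop i)
        (by rw [List.length_drop]; omega)
        (fun t ht => by
          rw [List.drop_drop]
          exact hmin (i + t) (by omega) (by omega))
      rw [List.drop_drop, show i + (κ - i) = κ by omega] at hskip
      have hconsκ : cs.drop κ = cs[κ] :: cs.drop (κ + 1) :=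
        (List.getElem_cons_drop (as := cs) (i := κ) (h := by omega)).symm
      have hguard : (cs.drop κ).take 7 = boxedPat := by
        rw [List.prefix_iff_eq_take, pat_len] at hpre
        exact hpre.symm
      have hcs6 : cs[κ + 6]? = some '{' := by
        have h6 : (cs.drop κ)[6]? = cs[κ + 6]? := List.getElem?_drop ..
        rw [← h6, ← List.getElem?_take_of_lt (by omega : (6:Nat) < 7), hguard]
        rfl
      have hguard' : (cs[κ] :: cs.drop (κ + 1)).take 7 = boxedPat := hconsκ ▸ hguard
      have hdrop76 : (cs.drop (κ + 1)).drop 6 = cs.drop (κ + 7) := by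
        rw [List.drop_drop, show κ + 1 + 6 = κ + 7 by omega]
      have hdictK : (bBuild cs.reverse ((cs.length : Int) - 1) [] PySem.Dict.empty).get? (K + 6)
          = ((uCloses (cs.drop (κ + 7))).head?).map (fun r => ((κ + 7 + r : Nat) : Int)) := by
        rw [hkκ, show (κ : Int) + 6 = ((κ + 6 : Nat) : Int) by push_cast; ring, dict_get]
        unfold matchSpec
        rw [if_pos hcs6, show κ + 6 + 1 = κ + 7 by omega]
      cases hu : uCloses (cs.drop (κ + 7)) with
      | nil =>
        have hinner : innerA (cs.drop (κ + 7)) 1 = none := by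
          rw [show (1 : Nat) = 0 + 1 from rfl, innerA_eq, hu]; rfl
        have hdict : (bBuild cs.reverse ((cs.length : Int) - 1) [] PySem.Dict.empty).get? (K + 6)
            = none := by rw [hdictK, hu]; rfl
        rw [hdict]
        rw [hskip, hconsκ, outerA, if_pos hguard', hdrop76, hinner]
        rw [ih (κ + 1) (by omega) (by omega)]
        have htoNat : K.toNat + 1 = κ + 1 := by omega
        have hslice : PySem.List.slice cs (some (i : Int)) (some (K + 1))
            = (cs.drop i).take (κ - i) ++ [cs[κ]] := by
          rw [hkκ, show (κ : Int) + 1 = ((κ + 1 : Nat) : Int) by push_cast; ring,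
            PySem.List.slice_natCast, show κ + 1 - i = (κ - i) + 1 by omega, List.take_add_one,
            List.getElem?_drop, show i + (κ - i) = κ by omega,
            List.getElem?_eq_getElem (by omega : κ < cs.length)]
          rfl
        rw [htoNat, hslice]
        simp [List.append_assoc]
      | cons r0 tl =>
        have hr0 : r0 < cs.length - (κ + 7) := by
          have := uCloses_lt (cs.drop (κ + 7)) r0 (by rw [hu]; exact List.mem_cons_self)
          rwa [List.length_drop] at this
        have hinner : innerA (cs.drop (κ + 7)) 1 = some (r0 + 1) := by
          rw [show (1 : Nat) = 0 + 1 from rfl, innerA_eq, hu]; rfl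
        have hdict : (bBuild cs.reverse ((cs.length : Int) - 1) [] PySem.Dict.empty).get? (K + 6)
            = some ((κ + 7 + r0 : Nat) : Int) := by rw [hdictK, hu]; rfl
        rw [hdict]
        rw [hskip, hconsκ, outerA, if_pos hguard', hdrop76, hinner]
        have hrec : (cs.drop (κ + 1)).drop (6 + (r0 + 1)) = cs.drop (κ + 8 + r0) := by
          rw [List.drop_drop, show κ + 1 + (6 + (r0 + 1)) = κ + 8 + r0 by omega]
        have htoNat : ((κ + 7 + r0 : Nat) : Int).toNat + 1 = κ + 8 + r0 := by omega
        dsimp only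
        rw [hrec, htoNat, ih (κ + 8 + r0) (by omega) (by omega)]
        have hcontent : PySem.List.slice cs (some (K + 7)) (some ((κ + 7 + r0 : Nat) : Int))
            = (cs.drop (κ + 7)).take r0 := by
          rw [hkκ, show (κ : Int) + 7 = ((κ + 7 : Nat) : Int) by push_cast; ring,
            PySem.List.slice_natCast, show κ + 7 + r0 - (κ + 7) = r0 by omega]
        have hpref : PySem.List.slice cs (some (i : Int)) (some K)
            = (cs.drop i).take (κ - i) := by
          rw [hkκ, PySem.List.slice_natCast]
        rw [hcontent, hpref]
        simp [List.append_assoc]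

-- ===== VERDICT (by name: the statement is the Claim_ definition above) =====
theorem extract_boxed_from_text_spec : Claim_equal_extract_boxed_from_text := by
  intro text _
  unfold Spec_extract_boxed_from_text extract_boxed_from_text extract_boxed_from_text_alt
  dsimp only
  have hmain : bLoop text.toList
      (bBuild text.toList.reverse ((text.toList.length : Int) - 1) [] PySem.Dict.empty)
      (text.toList.length + 1) 0 = outerA text.toList := by
    simpa using bLoop_eq text.toList (text.toList.length + 1) 0 (by omega) (by omega)
  by_cases hin : PySem.Str.isIn "\\boxed{" text = false
  · rw [if_pos hin]
    have hno : ¬ (boxedPat <:+: text.toList) := by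
      intro h
      rw [(PySem.Str.isIn_iff_infix "\\boxed{" text).mpr h] at hin
      simp at hin
    have hout : outerA text.toList = (text.toList, []) :=
      outerA_no_occ text.toList
        (fun t hp => hno ((hp.isInfix).trans ((List.drop_suffix t _).isInfix)))
    rw [hmain, hout]
    simp
  · rw [if_neg hin, hmain]
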